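-- pv_equiv track=rewrite | github.com/shehryarbajwa/Algorithms--Datastructures | algoexpert/hatchways/max_diff.py | max_difference
-- ===== SOURCE A (Python) =====
-- def max_difference(array):
--     max_diff = array[1] - array[0]
--     min_element = array[0]
--
--     for i in range(len(array)):
--         #denom
--         if array[i] - min_element > max_diff:
--             max_diff = array[i] - min_element
--
--         if array[i] < min_element:
--             min_element = array[i]
--
--     return max_diff
-- ===== SOURCE B (Python) =====
-- def max_difference(array):
--     max_diff = array[1] - array[0]
--     suffix = []
--     for x in reversed(array):
--         suffix.append(x if not suffix or x > suffix[-1] else suffix[-1])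
--     suffix.reverse()
--     for s, x in zip(suffix, array):
--         if s - x > max_diff:
--             max_diff = s - x
--     return max_diff
-- ===== Notes on version B (the rewrite author's own statement) =====
-- stated objective: alternative
-- what changed: Replaces the running-minimum single pass with a precomputed suffix-maximum table built right-to-left followed by a forward pass maximizing suffix[i]-array[i].
import Mathlib
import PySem

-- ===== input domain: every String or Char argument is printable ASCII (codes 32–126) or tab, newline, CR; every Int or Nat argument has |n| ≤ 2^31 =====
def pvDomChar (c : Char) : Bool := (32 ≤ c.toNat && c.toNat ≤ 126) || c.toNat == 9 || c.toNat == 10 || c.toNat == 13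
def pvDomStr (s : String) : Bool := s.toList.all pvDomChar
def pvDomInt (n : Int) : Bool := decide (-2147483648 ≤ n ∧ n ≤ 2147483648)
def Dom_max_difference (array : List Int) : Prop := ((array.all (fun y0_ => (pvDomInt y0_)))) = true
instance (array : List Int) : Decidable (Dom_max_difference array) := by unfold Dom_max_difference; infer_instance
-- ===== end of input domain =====

-- B replaces A's running-minimum pass with a precomputed suffix-maximum table plus a forward
-- pass maximizing suffix[i] - array[i]; same O(n) cost, different data structure (objective: alternative).

-- ===== PORT A =====
def max_difference (array : List Int) : Int :=
  let maxDiff : Int := PySem.List.pyGetD array 1 0 - PySem.List.pyGetD array 0 0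
  let minElement : Int := PySem.List.pyGetD array 0 0
  let st := (PySem.List.pyRange 0 (array.length : Int) 1).foldl
    (fun (s : Int × Int) i =>
      (if PySem.List.pyGetD array i 0 - s.2 > s.1 then PySem.List.pyGetD array i 0 - s.2 else s.1,
       if PySem.List.pyGetD array i 0 < s.2 then PySem.List.pyGetD array i 0 else s.2))
    (maxDiff, minElement)
  st.1

-- ===== PORT B =====
def max_difference_alt (array : List Int) : Int :=
  let maxDiff : Int := PySem.List.pyGetD array 1 0 - PySem.List.pyGetD array 0 0
  -- for x in reversed(array): suffix.append(x if not suffix or x > suffix[-1] else suffix[-1])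
  let built := array.reverse.foldl
    (fun (suffix : List Int) x =>
      suffix ++ [match suffix.getLast? with
                 | none => x
                 | some l => if x > l then x else l]) []
  -- suffix.reverse()
  let suffix := built.reverse
  -- for s, x in zip(suffix, array): …
  (suffix.zip array).foldl
    (fun md sx => if sx.1 - sx.2 > md then sx.1 - sx.2 else md) maxDiff

-- ===== PRECONDITION & SPEC =====
-- Python A raises IndexError (array[1]) whenever the list has fewer than two elements.
def Pre_max_difference (array : List Int) : Prop := 2 ≤ array.length
instance (array : List Int) : Decidable (Pre_max_difference array) := by
  unfold Pre_max_difference; infer_instance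
def pvWitness_max_difference : List Int := [3, -1, 4]

def Spec_max_difference (array : List Int) (out : Int) : Prop := out = max_difference_alt array
instance (array : List Int) (out : Int) : Decidable (Spec_max_difference array out) := by
  unfold Spec_max_difference; infer_instance

-- ===== CLAIM (what is proved, stated in full; the proofs are below) =====
def Claim_equal_max_difference : Prop := ∀ (array : List Int), Dom_max_difference array → Pre_max_difference array → Spec_max_difference array (max_difference array)

-- ===== LEMMAS AND PROOFS =====

-- max of an optional collection of values (none = no value yet)
def omaxI : Option Int → Option Int → Option Int
  | none, b => b
  | some a, none => some a
  | some a, some b => some (max a b)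

def maxO (md : Int) : Option Int → Int
  | none => md
  | some v => max md v

-- max of x :: r
def maxFrom : Int → List Int → Int
  | x, [] => x
  | x, y :: r => max x (maxFrom y r)

def listMax? : List Int → Option Int
  | [] => none
  | x :: r => some (maxFrom x r)

-- spec of A's loop: max over j of xs[j] - min(mn, xs[0..j-1])
def pmA : Int → List Int → Option Int
  | _, [] => none
  | mn, x :: r => omaxI (some (x - mn)) (pmA (min mn x) r)

-- spec of B's second loop: max over j of (max xs[j..]) - xs[j]
def pmB : List Int → Option Int
  | [] => none
  | x :: r => omaxI (some (maxFrom x r - x)) (pmB r)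

-- max over strict pairs i < j of xs[j] - xs[i]
def pmStrict : List Int → Option Int
  | [] => none
  | x :: r => omaxI ((listMax? r).map (fun M => M - x)) (pmStrict r)

-- the suffix-max table of xs
def sufMax : List Int → List Int
  | [] => []
  | x :: r => maxFrom x r :: sufMax r

-- running-max painting of a list (models B's first loop)
def withRun : Option Int → List Int → List Int
  | _, [] => []
  | none, x :: r => x :: withRun (some x) r
  | some m, x :: r => (if x > m then x else m) :: withRun (some (if x > m then x else m)) r

def runLast : Option Int → List Int → Option Int
  | o, [] => o
  | none, x :: r => runLast (some x) r
  | some m, x :: r => runLast (some (if x > m then x else m)) r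

theorem maxFrom_max (r : List Int) (m y : Int) :
    maxFrom (max m y) r = max m (maxFrom y r) := by
  cases r <;> simp [maxFrom, max_assoc]

theorem maxFrom_append_singleton (u : List Int) (x : Int) : ∀ y,
    maxFrom y (u ++ [x]) = max (maxFrom y u) x := by
  induction u with
  | nil => intro y; simp [maxFrom]
  | cons z u' ih => intro y; simp [maxFrom, ih z, max_assoc]

theorem listMax?_reverse (q : List Int) : listMax? q.reverse = listMax? q := by
  induction q with
  | nil => rfl
  | cons x r ih =>
    cases hrev : r.reverse with
    | nil =>
      have hr : r = [] := by simpa using congrArg List.reverse hrev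
      subst hr; rfl
    | cons h tl =>
      rcases r with _ | ⟨z, r'⟩
      · simp at hrev
      · have h1 : maxFrom h tl = maxFrom z r' := by
          rw [hrev] at ih
          simpa [listMax?] using ih
        calc listMax? ((x :: z :: r').reverse)
            = listMax? ((h :: tl) ++ [x]) := by rw [List.reverse_cons, hrev]
          _ = some (maxFrom h (tl ++ [x])) := rfl
          _ = some (max (maxFrom h tl) x) := by rw [maxFrom_append_singleton]
          _ = some (max x (maxFrom z r')) := by rw [h1, max_comm]
          _ = listMax? (x :: z :: r') := rfl

theorem runLast_some (q : List Int) : ∀ m, runLast (some m) q = some (maxFrom m q) := by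
  induction q with
  | nil => intro m; rfl
  | cons y r ih =>
    intro m
    have : (if y > m then y else m) = max m y := by omega
    simp only [runLast, this, ih, maxFrom_max, maxFrom]

theorem runLast_none (q : List Int) : runLast none q = listMax? q := by
  cases q with
  | nil => rfl
  | cons x r => simp only [runLast, runLast_some, listMax?]

theorem withRun_append_singleton (u : List Int) (x : Int) : ∀ o,
    withRun o (u ++ [x]) =
      withRun o u ++ [match runLast o u with | none => x | some m => if x > m then x else m] := by
  induction u with
  | nil => intro o; cases o <;> rfl
  | cons y u' ih =>
    intro o
    cases o with
    | none => simp only [List.cons_append, withRun, ih, runLast]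
    | some m => simp only [List.cons_append, withRun, ih, runLast]

theorem foldl_built (p : List Int) : ∀ acc : List Int,
    p.foldl (fun (suffix : List Int) x =>
      suffix ++ [match suffix.getLast? with
                 | none => x
                 | some l => if x > l then x else l]) acc
    = acc ++ withRun acc.getLast? p := by
  induction p with
  | nil => intro acc; simp [withRun]
  | cons x r ih =>
    intro acc
    simp only [List.foldl_cons, ih, List.getLast?_concat, List.append_assoc,
      List.cons_append, List.nil_append]
    congr 1
    cases hacc : acc.getLast? with
    | none => simp [withRun]
    | some l => simp [withRun]

theorem suffix_eq_sufMax (xs : List Int) :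
    (withRun none xs.reverse).reverse = sufMax xs := by
  induction xs with
  | nil => rfl
  | cons x r ih =>
    simp only [List.reverse_cons, withRun_append_singleton, runLast_none,
      List.reverse_append, List.reverse_cons, List.reverse_nil, List.nil_append,
      List.cons_append, ih, sufMax]
    congr 1
    rw [listMax?_reverse]
    cases r with
    | nil => rfl
    | cons z r' =>
      simp only [listMax?, maxFrom]
      split_ifs <;> omega

-- A's loop computes maxO md (pmA mn xs)
theorem foldA_spec (xs : List Int) : ∀ md mn : Int,
    (xs.foldl (fun (s : Int × Int) a =>
      (if a - s.2 > s.1 then a - s.2 else s.1,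
       if a < s.2 then a else s.2)) (md, mn)).1
    = maxO md (pmA mn xs) := by
  induction xs with
  | nil => intro md mn; rfl
  | cons x r ih =>
    intro md mn
    simp only [List.foldl_cons]
    have e1 : (if x - mn > md then x - mn else md) = max md (x - mn) := by
      split_ifs <;> omega
    have e2 : (if x < mn then x else mn) = min mn x := by
      split_ifs <;> omega
    rw [e1, e2, ih, pmA]
    rcases h : pmA (min mn x) r with _ | v <;> simp only [maxO, omaxI] <;> omega

-- B's second loop computes maxO md (pmB xs)
theorem foldB_spec (xs : List Int) : ∀ md : Int,
    (((sufMax xs).zip xs).foldl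
      (fun md sx => if sx.1 - sx.2 > md then sx.1 - sx.2 else md) md)
    = maxO md (pmB xs) := by
  induction xs with
  | nil => intro md; rfl
  | cons x r ih =>
    intro md
    simp only [sufMax, List.zip_cons_cons, List.foldl_cons]
    have e1 : (if maxFrom x r - x > md then maxFrom x r - x else md)
        = max md (maxFrom x r - x) := by split_ifs <;> omega
    rw [e1, ih, pmB]
    rcases h : pmB r with _ | v <;> simp only [maxO, omaxI] <;> omega

theorem pmA_min (r : List Int) : ∀ a b : Int,
    pmA (min a b) r = omaxI (pmA a r) (pmA b r) := by
  induction r with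
  | nil => intro a b; rfl
  | cons x r' ih =>
    intro a b
    have hmin : min (min a b) x = min (min a x) (min b x) := by omega
    simp only [pmA, hmin, ih (min a x) (min b x)]
    rcases h1 : pmA (min a x) r' with _ | p <;>
      rcases h2 : pmA (min b x) r' with _ | q <;>
        simp only [omaxI, Option.some.injEq] <;> omega

theorem pmA_eq_pmStrict_cons (t : List Int) : ∀ x : Int, pmA x t = pmStrict (x :: t) := by
  induction t with
  | nil => intro x; rfl
  | cons y r ih =>
    intro x
    rw [show pmA x (y :: r) = omaxI (some (y - x)) (pmA (min x y) r) from rfl,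
      pmA_min, ih x, ih y,
      show pmStrict (x :: y :: r)
          = omaxI ((listMax? (y :: r)).map (fun M => M - x)) (pmStrict (y :: r)) from rfl,
      show pmStrict (x :: r) = omaxI ((listMax? r).map (fun M => M - x)) (pmStrict r) from rfl,
      show pmStrict (y :: r) = omaxI ((listMax? r).map (fun M => M - y)) (pmStrict r) from rfl]
    rcases r with _ | ⟨z, r'⟩
    · simp [listMax?, pmStrict, omaxI, maxFrom]
    · simp only [listMax?, Option.map_some, maxFrom]
      rcases hP : pmStrict (z :: r') with _ | p <;>
        simp only [omaxI, Option.some.injEq] <;> omega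

theorem pmB_eq (t : List Int) (hne : t ≠ []) :
    pmB t = omaxI (some 0) (pmStrict t) := by
  induction t with
  | nil => exact absurd rfl hne
  | cons x r ih =>
    cases r with
    | nil => simp [pmB, pmStrict, listMax?, maxFrom, omaxI]
    | cons z r' =>
      rw [show pmB (x :: z :: r')
            = omaxI (some (maxFrom x (z :: r') - x)) (pmB (z :: r')) from rfl,
        ih (by simp),
        show pmStrict (x :: z :: r')
            = omaxI ((listMax? (z :: r')).map (fun M => M - x)) (pmStrict (z :: r')) from rfl]
      simp only [listMax?, Option.map_some, maxFrom]
      rcases hP : pmStrict (z :: r') with _ | p <;>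
        simp only [omaxI, Option.some.injEq] <;> omega

theorem pmA_eq_pmB (x : Int) (t : List Int) : pmA x (x :: t) = pmB (x :: t) := by
  have h1 : pmA x (x :: t) = omaxI (some 0) (pmStrict (x :: t)) := by
    simp only [pmA, min_self, sub_self, pmA_eq_pmStrict_cons]
  rw [h1, ← pmB_eq (x :: t) (by simp)]

-- ===== VERDICT (by name: the statement is the Claim_ definition above) =====
theorem max_difference_spec : Claim_equal_max_difference := by
  intro array _ hpre
  unfold Spec_max_difference
  rcases array with _ | ⟨a0, _ | ⟨a1, t⟩⟩
  · simp [Pre_max_difference] at hpre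
  · simp [Pre_max_difference] at hpre
  · have g0 : PySem.List.pyGetD (a0 :: a1 :: t) 0 0 = a0 := by simp [pysem]
    have g1 : PySem.List.pyGetD (a0 :: a1 :: t) 1 0 = a1 := by simp [pysem]
    simp only [max_difference, max_difference_alt, g0, g1]
    rw [PySem.List.foldl_pyRange_zero_pyGetD' (a0 :: a1 :: t) 0
      (fun (s : Int × Int) a =>
        (if a - s.2 > s.1 then a - s.2 else s.1,
         if a < s.2 then a else s.2)) (a1 - a0, a0)]
    rw [foldA_spec, foldl_built, List.nil_append, List.getLast?_nil, suffix_eq_sufMax,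
      foldB_spec, pmA_eq_pmB]
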